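-- pv_equiv track=rewrite | github.com/Roharui/NonoGram | alrgorism.py | inside
-- ===== SOURCE A (Python) =====
-- def inside(arr, cline):
--     result = []
--     num = 0
--     for i in cline:
--         if i == 1: num += 1
--         if i != 1 and num != 0:
--             result.append(num)
--             num = 0
--     if num != 0: result.append(num)
--     return arr == result
-- ===== SOURCE B (Python) =====
-- def inside(arr, cline):
--     # Two-pointer run scanner: jump over each maximal block of 1s at once,
--     # instead of maintaining a counter flushed on every break.
--     result = []
--     i, n = 0, len(cline)
--     while i < n:
--         if cline[i] == 1:
--             j = i
--             while j < n and cline[j] == 1: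
--                 j += 1
--             result.append(j - i)
--             i = j
--         else:
--             i += 1
--     return arr == result
-- ===== Notes on version B (the rewrite author's own statement) =====
-- stated objective: alternative
-- what changed: B replaces A's per-element counter with flush-on-break/flush-at-end by a two-pointer scanner that jumps over each maximal run of 1s and appends its length directly.
import Mathlib
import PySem

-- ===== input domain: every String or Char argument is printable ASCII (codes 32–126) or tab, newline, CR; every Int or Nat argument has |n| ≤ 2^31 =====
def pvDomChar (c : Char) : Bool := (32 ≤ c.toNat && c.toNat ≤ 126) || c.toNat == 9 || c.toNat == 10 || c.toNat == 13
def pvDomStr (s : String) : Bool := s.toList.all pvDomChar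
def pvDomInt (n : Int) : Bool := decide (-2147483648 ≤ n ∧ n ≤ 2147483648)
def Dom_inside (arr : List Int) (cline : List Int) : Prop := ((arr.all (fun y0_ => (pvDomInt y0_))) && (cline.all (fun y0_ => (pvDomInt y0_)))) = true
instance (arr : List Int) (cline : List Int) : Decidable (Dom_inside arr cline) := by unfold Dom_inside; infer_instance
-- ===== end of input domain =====

-- B replaces A's counter-with-flush accumulation by a two-pointer scan over maximal runs of 1s; objective: alternative decomposition, same cost.


-- ===== PORT A =====
-- one loop step: 'if i == 1: num += 1' then 'if i != 1 and num != 0: append & reset'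
def insideStep (s : List Int × Int) (i : Int) : List Int × Int :=
  let num := if i = 1 then s.2 + 1 else s.2
  if i ≠ 1 ∧ num ≠ 0 then (s.1 ++ [num], 0) else (s.1, num)

def inside (arr : List Int) (cline : List Int) : Bool :=
  let s := cline.foldl insideStep ([], 0)
  let result := if s.2 ≠ 0 then s.1 ++ [s.2] else s.1
  decide (arr = result)

-- ===== PORT B =====
-- the outer while loop; the inner 'while j < n and cline[j] == 1: j += 1' run scan
-- is ported exactly as takeWhile/dropWhile on the remaining suffix
def runsB : List Int → List Int
  | [] => []
  | x :: xs =>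
    if x = 1 then
      (((x :: xs).takeWhile (· = 1)).length : Int) :: runsB ((x :: xs).dropWhile (· = 1))
    else
      runsB xs
termination_by l => l.length
decreasing_by
  · simp only [List.dropWhile, List.length_cons, *, decide_true]
    have := (List.length_dropWhile_le (p := fun y => decide (y = (1:Int))) xs)
    omega
  · simp only [List.length_cons]; omega

def inside_alt (arr : List Int) (cline : List Int) : Bool :=
  decide (arr = runsB cline)

-- ===== PRECONDITION & SPEC =====
def Spec_inside (arr : List Int) (cline : List Int) (out : Bool) : Prop := out = inside_alt arr cline
instance (arr : List Int) (cline : List Int) (out : Bool) : Decidable (Spec_inside arr cline out) := by unfold Spec_inside; infer_instance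

-- ===== CLAIM (what is proved, stated in full; the proofs are below) =====
def Claim_equal_inside : Prop := ∀ (arr : List Int) (cline : List Int), Dom_inside arr cline → Spec_inside arr cline (inside arr cline)

-- ===== LEMMAS AND PROOFS =====

-- pending-run characterisation of A's loop
def pending (num : Int) : List Int → List Int
  | [] => if num ≠ 0 then [num] else []
  | x :: xs => if x = 1 then pending (num + 1) xs
               else if num ≠ 0 then num :: pending 0 xs else pending 0 xs

def flushA (s : List Int × Int) : List Int := if s.2 ≠ 0 then s.1 ++ [s.2] else s.1

theorem runsB_nil : runsB [] = [] := by rw [runsB.eq_def]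

theorem runsB_cons_one (xs : List Int) :
    runsB (1 :: xs) = (((1 :: xs).takeWhile (· = (1:Int))).length : Int) :: runsB ((1 :: xs).dropWhile (· = 1)) := by
  rw [runsB.eq_def]; simp

theorem runsB_cons_ne (x : Int) (xs : List Int) (hx : x ≠ 1) : runsB (x :: xs) = runsB xs := by
  rw [runsB.eq_def]; simp [hx]

theorem foldA_pending (cline : List Int) : ∀ (result : List Int) (num : Int),
    flushA (cline.foldl insideStep (result, num)) = result ++ pending num cline := by
  induction cline with
  | nil => intro result num; simp [flushA, pending]; split_ifs <;> simp
  | cons x xs ih =>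
    intro result num
    rw [List.foldl_cons]
    by_cases hx : x = 1
    · subst hx
      have hstep : insideStep (result, num) 1 = (result, num + 1) := by
        simp [insideStep]
      rw [hstep, ih]
      simp [pending]
    · have hstep : insideStep (result, num) x
          = if num ≠ 0 then (result ++ [num], 0) else (result, num) := by
        by_cases hn : num = 0 <;> simp [insideStep, hx, hn]
      by_cases hn : num = 0
      · rw [hstep]; simp [hn, ih, pending, hx]
      · rw [hstep]; simp [hn, ih, pending, hx]

theorem runsB_replicate (cline : List Int) : ∀ (n : Nat),
    runsB (List.replicate n 1 ++ cline) = pending (n : Int) cline := by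
  induction cline with
  | nil =>
    intro n
    cases n with
    | zero => simp [runsB_nil, pending]
    | succ m =>
      simp only [List.append_nil, pending]
      have ht : ((List.replicate (m+1) (1 : Int)).takeWhile (· = 1)) = List.replicate (m+1) 1 := by
        simp
      have hd : ((List.replicate (m+1) (1 : Int)).dropWhile (· = 1)) = [] := by
        simp
      rw [List.replicate_succ, runsB_cons_one, ← List.replicate_succ, ht, hd, runsB_nil]
      simp [List.length_replicate]
      omega
  | cons x xs ih =>
    intro n
    by_cases hx : x = 1
    · have : List.replicate n (1 : Int) ++ x :: xs = List.replicate (n+1) 1 ++ xs := by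
        subst hx
        rw [List.replicate_succ' (n := n)]
        simp
      rw [this, ih (n+1), pending, if_pos hx]
      norm_num
    · cases n with
      | zero => simpa [runsB_cons_ne x xs hx, pending, hx] using ih 0
      | succ m =>
        have ht : ((List.replicate (m+1) (1:Int) ++ x :: xs).takeWhile (· = 1)) = List.replicate (m+1) 1 := by
          rw [List.takeWhile_append]
          simp [List.takeWhile, hx]
        have hd : ((List.replicate (m+1) (1:Int) ++ x :: xs).dropWhile (· = 1)) = x :: xs := by
          rw [List.dropWhile_append]
          simp [List.dropWhile, hx]
        rw [List.replicate_succ, List.cons_append, runsB_cons_one, ← List.cons_append,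
            ← List.replicate_succ, ht, hd, runsB_cons_ne x xs hx]
        have h0 := ih 0
        simp only [List.replicate_zero, List.nil_append] at h0
        rw [h0]
        simp [pending, hx, List.length_replicate]
        omega

theorem runsB_eq_pending (cline : List Int) : runsB cline = pending 0 cline := by
  have := runsB_replicate cline 0
  simpa using this

-- ===== VERDICT (by name: the statement is the Claim_ definition above) =====
theorem inside_spec : Claim_equal_inside := by
  intro arr cline _
  show inside arr cline = inside_alt arr cline
  simp only [inside, inside_alt]
  have h := foldA_pending cline [] 0
  simp only [flushA] at h
  rw [h, runsB_eq_pending]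
  simp
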